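-- pv_equiv track=rewrite | github.com/madhukarbura/preparation_job | accenture/magic_string.py | magic_string
-- ===== SOURCE A (Python) =====
-- def magic_string(str):
--     dic={}
--     for i in str:
--         if i in dic:
--             dic[i]+=1
--         else:
--             dic[i]=1
--     maxx=0
--     max_element=""
--     for key,val in dic.items():
--         if val>maxx:
--             maxx=val
--             max_element=key
--     return abs(maxx-len(str))
-- ===== SOURCE B (Python) =====
-- def magic_string(str):
--     def best(s):
--         if not s:
--             return 0
--         c = s[0]
--         return max(s.count(c), best(s.replace(c, "")))
--     return len(str) - best(str)
-- ===== Notes on version B (the rewrite author's own statement) =====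
-- stated objective: simpler
-- what changed: Replaced the frequency-dict build plus a separate max-scan over dict items (and the abs of maxx-len) by a short recursion that counts the first character and recurses on the string with that character removed, returning len minus the best count directly.
import Mathlib
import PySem

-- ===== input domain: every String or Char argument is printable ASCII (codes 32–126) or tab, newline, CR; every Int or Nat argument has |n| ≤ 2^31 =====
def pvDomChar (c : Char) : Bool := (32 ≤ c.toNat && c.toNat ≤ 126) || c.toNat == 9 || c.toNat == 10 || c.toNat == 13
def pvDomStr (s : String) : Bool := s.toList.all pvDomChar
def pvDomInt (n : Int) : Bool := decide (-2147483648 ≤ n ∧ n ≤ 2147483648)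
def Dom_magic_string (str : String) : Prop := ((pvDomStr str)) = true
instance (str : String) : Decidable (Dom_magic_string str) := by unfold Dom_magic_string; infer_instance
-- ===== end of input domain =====

-- B replaces A's hash-count-then-max-scan by a recursive select-count-and-filter pass
-- (objective: simpler — no dictionary, one short recursion); return value only, no mutation.

-- ===== PORT A =====
def magic_string (str : String) : Int :=
  let dic : PySem.Dict Char Int :=
    str.toList.foldl
      (fun d i => if d.contains i then d.modify i 0 (· + 1) else d.insert i 1)
      PySem.Dict.empty
  let r : Int × String :=
    dic.items.foldl
      (fun acc kv => if kv.2 > acc.1 then (kv.2, String.ofList [kv.1]) else acc)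
      (0, "")
  |r.1 - PySem.Str.len str|

-- ===== PORT B =====
-- best(s): if s empty then 0 else max(s.count(s[0]), best(s with s[0] removed everywhere));
-- s.count(c) for the single character c = s[0] is the character count.
def pvBest : List Char → Int
  | [] => 0
  | c :: rest =>
      max (((c :: rest).count c : Nat) : Int) (pvBest (rest.filter (fun x => !(x == c))))
termination_by l => l.length
decreasing_by
  simpa using Nat.lt_succ_of_le (le_trans (List.length_filter_le _ rest.attach) (by simp))

def magic_string_alt (str : String) : Int :=
  PySem.Str.len str - pvBest str.toList

-- ===== PRECONDITION & SPEC =====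
def Spec_magic_string (str : String) (out : Int) : Prop := out = magic_string_alt str
instance (str : String) (out : Int) : Decidable (Spec_magic_string str out) := by unfold Spec_magic_string; infer_instance

-- ===== CLAIM (what is proved, stated in full; the proofs are below) =====
def Claim_equal_magic_string : Prop := ∀ (str : String), Dom_magic_string str → Spec_magic_string str (magic_string str)

-- ===== LEMMAS AND PROOFS =====

-- A's counting loop body is exactly Counter's update step.
theorem pv_step_eq (d : PySem.Dict Char Int) (x : Char) :
    (if d.contains x then d.modify x 0 (· + 1) else d.insert x 1) = d.modify x 0 (· + 1) := by
  by_cases h : d.contains x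
  · simp [h]
  · simp only [Bool.not_eq_true] at h
    simp [h, PySem.Dict.modify, PySem.Dict.getD_of_not_contains d 0 h]

theorem pv_dict_eq (l : List Char) :
    l.foldl (fun d i => if d.contains i then d.modify i 0 (· + 1) else d.insert i 1)
      PySem.Dict.empty = PySem.Dict.counter l := by
  rw [PySem.Dict.counter_eq_foldl]
  exact PySem.List.foldl_congr_mem l _ _ _ (fun d x _ => pv_step_eq d x)

-- the max-scan over (key, value) pairs computes the running maximum of the values
theorem pv_scan_fst (items : List (Char × Int)) :
    ∀ (m : Int) (e : String),
      (items.foldl (fun acc kv => if kv.2 > acc.1 then (kv.2, String.ofList [kv.1]) else acc)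
        (m, e)).1
      = items.foldl (fun m kv => max m kv.2) m := by
  intro m e
  induction items generalizing m e with
  | nil => rfl
  | cons kv t ih =>
      simp only [List.foldl_cons]
      by_cases h : kv.2 > m
      · rw [if_pos h, ih, max_eq_right (le_of_lt h)]
      · rw [if_neg h, ih, max_eq_left (le_of_not_gt h)]

theorem pv_foldl_max_cons (g : Char → Int) (x : Char) (t : List Char) :
    List.foldl (fun m k => max m (g k)) 0 (x :: t)
      = max (g x) (List.foldl (fun m k => max m (g k)) 0 t) := by
  have h : ∀ (s : List Char) (a b : Int),
      List.foldl (fun m k => max m (g k)) (max a b) s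
        = max a (List.foldl (fun m k => max m (g k)) b s) := by
    intro s
    induction s with
    | nil => intro a b; rfl
    | cons y s ih =>
        intro a b
        simp only [List.foldl_cons, max_assoc]
        exact ih a (max b (g y))
  simpa [max_comm] using h t (g x) 0

theorem pv_discard_ofList (xs : List Char) (c : Char) :
    (PySem.Set.ofList xs).discard c
      = PySem.Set.ofList (xs.filter (fun y => !(y == c))) := by
  have fc : ∀ (s : List Char) (p q : Char → Bool),
      (s.filter q).filter p = (s.filter p).filter q := by
    intro s p q
    rw [List.filter_filter, List.filter_filter]
    congr 1
    funext y
    exact Bool.and_comm _ _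
  induction xs with
  | nil => rfl
  | cons x xs ih =>
      rw [PySem.Set.ofList_cons]
      by_cases hxc : x = c
      · subst hxc
        rw [List.filter_cons_of_neg (by simp)]
        simp only [PySem.Set.discard] at ih ⊢
        rw [List.filter_cons_of_neg (by simp), List.filter_filter]
        simp only [Bool.and_self]
        exact ih
      · rw [List.filter_cons_of_pos (by simp [hxc]), PySem.Set.ofList_cons]
        simp only [PySem.Set.discard] at ih ⊢
        rw [List.filter_cons_of_pos (by simp [hxc])]
        congr 1
        rw [fc, ih]

theorem pv_best_eq_aux (n : Nat) :
    ∀ (l : List Char), l.length ≤ n →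
      List.foldl (fun m k => max m ((l.count k : Nat) : Int)) 0 (PySem.Set.ofList l)
        = pvBest l := by
  induction n with
  | zero =>
      intro l h
      have hl : l = [] := List.eq_nil_of_length_eq_zero (Nat.le_zero.mp h)
      subst hl
      simp [pvBest]
  | succ n ih =>
      intro l h
      match l with
      | [] => simp [pvBest]
      | c :: rest =>
        rw [PySem.Set.ofList_cons, pv_discard_ofList]
        set rest' := rest.filter (fun x => !(x == c)) with hrest'
        rw [pv_foldl_max_cons (fun k => (((c :: rest).count k : Nat) : Int)) c]
        have hcong :
            List.foldl (fun m k => max m (((c :: rest).count k : Nat) : Int)) 0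
                (PySem.Set.ofList rest')
              = List.foldl (fun m k => max m ((rest'.count k : Nat) : Int)) 0
                (PySem.Set.ofList rest') := by
          apply PySem.List.foldl_congr_mem
          intro m k hk
          rw [PySem.Set.mem_ofList, hrest', List.mem_filter] at hk
          have hne : ¬ (k = c) := by simpa using hk.2
          have h1 : (c :: rest).count k = rest.count k := by
            simp [Ne.symm hne]
          have h2 : rest'.count k = rest.count k := by
            rw [hrest']
            exact List.count_filter (by simpa using hne)
          rw [h1, h2]
        have hlen : rest'.length ≤ n := by
          have h1 : rest'.length ≤ rest.length := by
            rw [hrest']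
            exact List.length_filter_le _ rest
          simp only [List.length_cons] at h
          omega
        rw [hcong, ih rest' hlen, pvBest]

theorem pv_best_eq (l : List Char) :
    List.foldl (fun m k => max m ((l.count k : Nat) : Int)) 0 (PySem.Set.ofList l)
      = pvBest l :=
  pv_best_eq_aux l.length l le_rfl

theorem pv_best_bounds_aux (n : Nat) :
    ∀ (l : List Char), l.length ≤ n → 0 ≤ pvBest l ∧ pvBest l ≤ (l.length : Int) := by
  induction n with
  | zero =>
      intro l h
      have hl : l = [] := List.eq_nil_of_length_eq_zero (Nat.le_zero.mp h)
      subst hl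
      simp [pvBest]
  | succ n ih =>
      intro l h
      match l with
      | [] => simp [pvBest]
      | c :: rest =>
        have hcnt : (c :: rest).count c ≤ (c :: rest).length := List.count_le_length
        have hlen : (rest.filter (fun x => !(x == c))).length ≤ rest.length :=
          List.length_filter_le _ rest
        simp only [List.length_cons] at h
        have hrec := ih (rest.filter (fun x => !(x == c))) (by omega)
        rw [pvBest]
        constructor
        · exact le_max_of_le_right hrec.1
        · apply max_le
          · exact_mod_cast hcnt
          · have := hrec.2
            simp only [List.length_cons]
            push_cast
            omega

theorem pv_best_bounds (l : List Char) : 0 ≤ pvBest l ∧ pvBest l ≤ (l.length : Int) :=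
  pv_best_bounds_aux l.length l le_rfl

-- ===== VERDICT (by name: the statement is the Claim_ definition above) =====
theorem magic_string_spec : Claim_equal_magic_string := by
  intro str _
  unfold Spec_magic_string magic_string magic_string_alt
  simp only [pv_dict_eq, PySem.Dict.items_counter]
  rw [pv_scan_fst]
  rw [List.foldl_map]
  have hmax :
      List.foldl (fun m kv => max m kv.2) (0 : Int)
          ((PySem.Set.ofList str.toList).map
            (fun k => (k, ((str.toList.count k : Nat) : Int))))
        = pvBest str.toList := by
    rw [List.foldl_map]
    exact pv_best_eq str.toList
  rw [List.foldl_map] at hmax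
  rw [hmax, PySem.Str.len_eq]
  have hb := pv_best_bounds str.toList
  rw [abs_of_nonpos (by omega)]
  omega
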